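-- pv_equiv track=rewrite | github.com/Chudopal/graph_editor | graph/convertation.py | make_binary_tree
-- ===== SOURCE A (Python) =====
-- def make_binary_tree(numb_of_nodes):
--     matrix = [[0] * numb_of_nodes for i in range(0, numb_of_nodes)]
--     size = numb_of_nodes/2
--     for node_numb in range(0, int(size)):
--         matrix[node_numb][node_numb*2+1] = 1
--         if (node_numb*2+1) != (len(matrix)-1) :
--             matrix[node_numb][node_numb*2+2] = 1
--     return matrix
-- ===== SOURCE B (Python) =====
-- def make_binary_tree(numb_of_nodes):
--     def row(i):
--         if 2 * i + 2 < numb_of_nodes: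
--             return [0] * (2 * i + 1) + [1, 1] + [0] * (numb_of_nodes - (2 * i + 2) - 1)
--         if 2 * i + 1 < numb_of_nodes:
--             return [0] * (2 * i + 1) + [1]
--         return [0] * numb_of_nodes
--     return [row(i) for i in range(numb_of_nodes)]
-- ===== Notes on version B (the rewrite author's own statement) =====
-- stated objective: alternative
-- what changed: A allocates a zero matrix and mutates it in a parent loop (left edge always, right edge behind a boundary guard); B never mutates: it builds each row directly as a concatenation of zero segments and the 1-entries at the computed child positions 2i+1, 2i+2.
import Mathlib
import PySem

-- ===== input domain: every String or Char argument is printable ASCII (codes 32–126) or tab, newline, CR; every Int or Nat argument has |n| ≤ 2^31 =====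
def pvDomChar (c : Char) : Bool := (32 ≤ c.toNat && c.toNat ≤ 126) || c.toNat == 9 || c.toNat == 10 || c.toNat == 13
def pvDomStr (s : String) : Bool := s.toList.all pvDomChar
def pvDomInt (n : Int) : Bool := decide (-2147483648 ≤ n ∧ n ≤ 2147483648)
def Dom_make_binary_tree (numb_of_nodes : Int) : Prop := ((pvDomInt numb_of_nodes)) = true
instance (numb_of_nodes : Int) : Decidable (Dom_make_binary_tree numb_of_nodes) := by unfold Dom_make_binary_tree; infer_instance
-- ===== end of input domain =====

-- B replaces A's zero-matrix allocation and mutating parent loop (left edge always, right edge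
-- behind a boundary guard) by a pure per-cell comprehension: cell (i,j) is 1 iff j = 2i+1 or 2i+2.

-- ===== PORT A =====
-- matrix[i][j] = 1; in A both indices are provably nonnegative and in range
-- (so Python never raises and never uses negative-index wraparound), hence List.set on .toNat is exact here.
def pvSetCell (m : List (List Int)) (i j : Int) : List (List Int) :=
  m.set i.toNat ((m.getD i.toNat []).set j.toNat 1)

-- one body of A's 'for node_numb in range(0, int(size))' loop
def pvAStep (m : List (List Int)) (i : Int) : List (List Int) :=
  let m1 := pvSetCell m i (i * 2 + 1)
  if i * 2 + 1 ≠ (m1.length : Int) - 1 then pvSetCell m1 i (i * 2 + 2) else m1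

def make_binary_tree (numb_of_nodes : Int) : List (List Int) :=
  -- [[0] * numb_of_nodes for i in range(0, numb_of_nodes)]  ([0]*n is [] for n ≤ 0, = replicate n.toNat)
  let matrix := (PySem.List.pyRange 0 numb_of_nodes 1).map (fun _ => List.replicate numb_of_nodes.toNat (0 : Int))
  -- size = n/2 (true division); int(size) truncates toward zero = Int.tdiv
  (PySem.List.pyRange 0 (Int.tdiv numb_of_nodes 2) 1).foldl pvAStep matrix

-- ===== PORT B =====
-- B's helper row(i): the row built by concatenating zero segments around the 1-entries
-- ([0]*m is [] for m ≤ 0, = replicate m.toNat)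
def pvRowB (n i : Int) : List Int :=
  if 2 * i + 2 < n then
    List.replicate (2 * i + 1).toNat 0 ++ [1, 1] ++ List.replicate (n - (2 * i + 2) - 1).toNat 0
  else if 2 * i + 1 < n then
    List.replicate (2 * i + 1).toNat 0 ++ [1]
  else
    List.replicate n.toNat 0

def make_binary_tree_alt (numb_of_nodes : Int) : List (List Int) :=
  (PySem.List.pyRange 0 numb_of_nodes 1).map (fun i => pvRowB numb_of_nodes i)

-- ===== PRECONDITION & SPEC =====
def Spec_make_binary_tree (numb_of_nodes : Int) (out : List (List Int)) : Prop := out = make_binary_tree_alt numb_of_nodes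
instance (numb_of_nodes : Int) (out : List (List Int)) : Decidable (Spec_make_binary_tree numb_of_nodes out) := by unfold Spec_make_binary_tree; infer_instance

-- ===== CLAIM (what is proved, stated in full; the proofs are below) =====
def Claim_equal_make_binary_tree : Prop := ∀ (numb_of_nodes : Int), Dom_make_binary_tree numb_of_nodes → Spec_make_binary_tree numb_of_nodes (make_binary_tree numb_of_nodes)

-- ===== LEMMAS AND PROOFS =====

-- A's matrix after the parents 0..k-1 have been processed: row i is B's row for i < k, zero otherwise.
def pvPartial (n k : Int) : List (List Int) :=
  (PySem.List.pyRange 0 n 1).map (fun i => if i < k then pvRowB n i else List.replicate n.toNat 0)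

-- B's concatenated row, characterised cell-wise (the form the equivalence proof works in)
theorem pv_rowB_eq_map (n i : Int) (h0 : 0 ≤ i) :
    pvRowB n i = (PySem.List.pyRange 0 n 1).map
      (fun j => if j = 2 * i + 1 ∨ j = 2 * i + 2 then (1 : Int) else 0) := by
  have h2 : ([1, 1] : List Int) = List.replicate 2 1 := rfl
  unfold pvRowB
  by_cases hr : 2 * i + 2 < n
  · rw [if_pos hr, h2]
    apply List.ext_getElem
    · simp [PySem.List.length_pyRange_one]; omega
    · intro j hj hj'
      simp only [List.length_append, List.length_replicate] at hj
      simp only [List.getElem_append, List.getElem_replicate, List.getElem_map,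
        PySem.List.getElem_pyRange_one, List.length_append, List.length_replicate, zero_add]
      split_ifs <;> omega
  · rw [if_neg hr]
    by_cases hl : 2 * i + 1 < n
    · rw [if_pos hl]
      apply List.ext_getElem
      · simp [PySem.List.length_pyRange_one]; omega
      · intro j hj hj'
        simp only [List.length_append, List.length_replicate, List.length_cons,
          List.length_nil] at hj
        simp only [List.getElem_append, List.getElem_replicate, List.getElem_map,
          PySem.List.getElem_pyRange_one, List.length_replicate, List.getElem_singleton,
          zero_add]
        split_ifs <;> omega
    · rw [if_neg hl]
      apply List.ext_getElem
      · simp [PySem.List.length_pyRange_one]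
      · intro j hj hj'
        simp only [List.length_replicate] at hj
        simp only [List.getElem_replicate, List.getElem_map,
          PySem.List.getElem_pyRange_one, zero_add]
        rw [if_neg (by omega)]

theorem pv_len_partial (n k : Int) : (pvPartial n k).length = n.toNat := by
  simp [pvPartial, PySem.List.length_pyRange_one]

-- both of A's cell-writes in row k produce exactly B's row, when the right child exists …
theorem pv_row_full (n k : Int) (h0 : 0 ≤ k) (_h : k * 2 + 2 < n) :
    ((List.replicate n.toNat (0 : Int)).set (k * 2 + 1).toNat 1).set (k * 2 + 2).toNat 1
      = pvRowB n k := by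
  rw [pv_rowB_eq_map n k h0]
  apply List.ext_getElem
  · simp [PySem.List.length_pyRange_one]
  · intro j hj hj'
    simp only [List.length_set, List.length_replicate] at hj
    simp only [List.getElem_map, PySem.List.getElem_pyRange_one, List.getElem_set,
      List.getElem_replicate, zero_add]
    split_ifs <;> omega

-- … and the single left write alone when 2k+1 is the last node (A's guard suppresses the right edge)
theorem pv_row_last (n k : Int) (h0 : 0 ≤ k) (h1 : k * 2 + 1 < n) (h : n ≤ k * 2 + 2) :
    (List.replicate n.toNat (0 : Int)).set (k * 2 + 1).toNat 1 = pvRowB n k := by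
  rw [pv_rowB_eq_map n k h0]
  apply List.ext_getElem
  · simp [PySem.List.length_pyRange_one]
  · intro j hj hj'
    simp only [List.length_set, List.length_replicate] at hj
    simp only [List.getElem_map, PySem.List.getElem_pyRange_one, List.getElem_set,
      List.getElem_replicate, zero_add]
    split_ifs <;> omega

theorem pv_partial_get (n k : Int) (h0 : 0 ≤ k) (hk : k < n) :
    (pvPartial n k)[k.toNat]?.getD [] = List.replicate n.toNat 0 := by
  have hlen : k.toNat < (pvPartial n k).length := by
    rw [pv_len_partial]; omega
  rw [List.getElem?_eq_getElem hlen, Option.getD_some]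
  simp only [pvPartial, List.getElem_map, PySem.List.getElem_pyRange_one, zero_add]
  rw [if_neg (by omega)]

theorem pv_set_row (n k : Int) (h0 : 0 ≤ k) (_hkn : k < n) (row : List Int)
    (hrow : row = pvRowB n k) :
    (pvPartial n k).set k.toNat row = pvPartial n (k + 1) := by
  apply List.ext_getElem
  · simp [pv_len_partial]
  · intro j hj hj'
    simp only [pvPartial, List.getElem_set, List.getElem_map,
      PySem.List.getElem_pyRange_one, zero_add]
    by_cases hjk : k.toNat = j
    · rw [if_pos hjk, if_pos (by omega), hrow]
      congr 1
      omega
    · rw [if_neg hjk]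
      by_cases hlt : (j : Int) < k
      · rw [if_pos hlt, if_pos (by omega)]
      · rw [if_neg hlt, if_neg (by omega)]

theorem pv_step (n k : Int) (hn : 0 < n) (h0 : 0 ≤ k) (hk : k < Int.tdiv n 2) :
    pvAStep (pvPartial n k) k = pvPartial n (k + 1) := by
  have htd : Int.tdiv n 2 = n / 2 := Int.tdiv_eq_ediv_of_nonneg (le_of_lt hn)
  rw [htd] at hk
  have h1 : k * 2 + 1 < n := by omega
  have hkn : k < n := by omega
  have hget := pv_partial_get n k h0 hkn
  have hm1 : pvSetCell (pvPartial n k) k (k * 2 + 1)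
      = (pvPartial n k).set k.toNat ((List.replicate n.toNat (0 : Int)).set (k * 2 + 1).toNat 1) := by
    simp only [pvSetCell, List.getD_eq_getElem?_getD, hget]
  have hm1len : ((pvSetCell (pvPartial n k) k (k * 2 + 1)).length : Int) = n := by
    rw [hm1]; simp [pv_len_partial]; omega
  unfold pvAStep
  simp only [hm1len]
  by_cases hg : k * 2 + 1 ≠ n - 1
  · have h2 : k * 2 + 2 < n := by omega
    rw [if_pos hg, hm1]
    have hgd : ((pvPartial n k).set k.toNat
          ((List.replicate n.toNat (0 : Int)).set (k * 2 + 1).toNat 1)).getD k.toNat []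
        = (List.replicate n.toNat (0 : Int)).set (k * 2 + 1).toNat 1 := by
      have hl : k.toNat < (pvPartial n k).length := by rw [pv_len_partial]; omega
      rw [List.getD_eq_getElem?_getD,
          List.getElem?_eq_getElem (by simpa using hl), Option.getD_some,
          List.getElem_set_self]
    simp only [pvSetCell, List.getD_eq_getElem?_getD] at hgd ⊢
    rw [hgd, List.set_set]
    exact pv_set_row n k h0 hkn _ (pv_row_full n k h0 h2)
  · rw [if_neg hg, hm1]
    exact pv_set_row n k h0 hkn _ (pv_row_last n k h0 h1 (by omega))

theorem pv_fold (n : Int) (hn : 0 < n) :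
    ∀ (fuel : Nat) (k : Int), 0 ≤ k → k + fuel = Int.tdiv n 2 →
    (PySem.List.pyRange k (Int.tdiv n 2) 1).foldl pvAStep (pvPartial n k)
      = pvPartial n (Int.tdiv n 2) := by
  intro fuel
  induction fuel with
  | zero =>
    intro k hk hsum
    rw [PySem.List.pyRange_one_eq_nil (by omega)]
    simp only [List.foldl_nil]
    congr 1
    omega
  | succ m ih =>
    intro k hk hsum
    have hlt : k < Int.tdiv n 2 := by omega
    rw [PySem.List.pyRange_one_cons hlt]
    simp only [List.foldl_cons]
    rw [pv_step n k hn hk hlt]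
    exact ih (k + 1) (by omega) (by omega)

theorem pv_init (n : Int) :
    (PySem.List.pyRange 0 n 1).map (fun _ => List.replicate n.toNat (0 : Int)) = pvPartial n 0 := by
  unfold pvPartial
  apply List.map_congr_left
  intro i hi
  have := (PySem.List.mem_pyRange_one).mp hi
  rw [if_neg (by omega)]

theorem pv_rowB_zero (n i : Int) (h : n ≤ 2 * i + 1) :
    pvRowB n i = List.replicate n.toNat 0 := by
  unfold pvRowB
  rw [if_neg (by omega), if_neg (by omega)]

theorem pv_final (n : Int) (hn : 0 < n) :
    pvPartial n (Int.tdiv n 2) = make_binary_tree_alt n := by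
  have htd : Int.tdiv n 2 = n / 2 := Int.tdiv_eq_ediv_of_nonneg (le_of_lt hn)
  unfold pvPartial make_binary_tree_alt
  apply List.map_congr_left
  intro i hi
  have := (PySem.List.mem_pyRange_one).mp hi
  by_cases h : i < Int.tdiv n 2
  · rw [if_pos h]
  · rw [if_neg h, pv_rowB_zero n i (by rw [htd] at h; omega)]

-- ===== VERDICT =====
theorem make_binary_tree_spec : Claim_equal_make_binary_tree := by
  intro n _
  unfold Spec_make_binary_tree
  by_cases hn : 0 < n
  · show make_binary_tree n = make_binary_tree_alt n
    unfold make_binary_tree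
    rw [pv_init n, pv_fold n hn (Int.tdiv n 2).toNat 0 le_rfl
      (by have : 0 ≤ Int.tdiv n 2 := Int.tdiv_nonneg (le_of_lt hn) (by omega); omega),
      pv_final n hn]
  · show make_binary_tree n = make_binary_tree_alt n
    unfold make_binary_tree make_binary_tree_alt
    rw [PySem.List.pyRange_one_eq_nil (b := n) (by omega),
        PySem.List.pyRange_one_eq_nil (b := Int.tdiv n 2) (by
          have := Int.tdiv_le_tdiv (by omega : (0:Int) < 2) (by omega : n ≤ 0)
          simpa using this)]
    rfl
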